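-- pv_equiv track=rewrite | github.com/FlutteryEmbers/intelligent_code | src/utils/safety/scanner.py | find_blacklist_hits
-- ===== SOURCE A (Python) =====
-- def find_blacklist_hits(text: str, blacklist_keywords: list[str]) -> list[str]:
--     """
--     Find blacklist keyword hits in text.
--
--     Args:
--         text: Text to scan
--         blacklist_keywords: List of keywords to check
--
--     Returns:
--         List of matched keywords
--     """
--     if not text or not blacklist_keywords:
--         return []
--
--     lowered = text.lower()
--     hits = []
--     for keyword in blacklist_keywords:
--         if not isinstance(keyword, str) or not keyword:
--             continue
--         if keyword.lower() in lowered: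
--             hits.append(keyword)
--     return hits
-- ===== SOURCE B (Python) =====
-- def find_blacklist_hits(text: str, blacklist_keywords: list[str]) -> list[str]:
--     # Hash-index scan: put the lowered keywords in a set, then for every text
--     # position probe one slice per distinct keyword length; emit in blacklist order.
--     lowered = text.lower()
--     keys = {kw.lower() for kw in blacklist_keywords if isinstance(kw, str) and kw}
--     lengths = sorted({len(k) for k in keys})
--     found = set()
--     for j in range(len(lowered)):
--         for L in lengths:
--             sub = lowered[j:j + L]
--             if sub in keys:
--                 found.add(sub)
--     return [kw for kw in blacklist_keywords
--             if isinstance(kw, str) and kw and kw.lower() in found]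
-- ===== Notes on version B (the rewrite author's own statement) =====
-- stated objective: faster
-- what changed: A runs one whole-text substring search per keyword; B builds a hash set of the lowered keywords once and makes a single pass over text positions, probing one slice per distinct keyword length against the set, then emits hits in blacklist order from the found set.
import Mathlib
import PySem

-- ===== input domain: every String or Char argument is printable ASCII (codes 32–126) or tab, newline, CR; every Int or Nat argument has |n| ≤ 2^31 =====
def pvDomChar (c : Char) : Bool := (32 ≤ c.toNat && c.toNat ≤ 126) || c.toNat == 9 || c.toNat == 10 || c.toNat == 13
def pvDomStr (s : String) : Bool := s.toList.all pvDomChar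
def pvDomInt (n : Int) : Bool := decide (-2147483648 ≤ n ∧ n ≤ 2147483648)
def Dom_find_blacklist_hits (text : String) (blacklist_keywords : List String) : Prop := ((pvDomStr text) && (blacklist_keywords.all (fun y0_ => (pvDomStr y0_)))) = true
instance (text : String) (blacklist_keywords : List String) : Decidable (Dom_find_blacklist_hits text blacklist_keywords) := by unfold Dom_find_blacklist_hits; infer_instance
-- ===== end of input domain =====

-- B replaces A's per-keyword substring search by a hash-set probe: one pass over text
-- positions checking one slice per distinct keyword length against the keyword set
-- (objective: faster when there are many keywords of few distinct lengths).

-- ===== PORT A =====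
-- A: guard on empty text/list, lower the text, then for each keyword append it to
-- hits when its lowered form occurs in the lowered text (empty keywords skipped;
-- `isinstance(keyword, str)` is always true under the type convention).
def find_blacklist_hits (text : String) (blacklist_keywords : List String) : List String :=
  if text.toList = [] ∨ blacklist_keywords = [] then []
  else
    let lowered := PySem.Chars.lower text.toList
    blacklist_keywords.foldl
      (fun hits keyword =>
        if keyword.toList = [] then hits
        else if PySem.Chars.isIn (PySem.Chars.lower keyword.toList) lowered then hits ++ [keyword]
        else hits)
      []

-- ===== PORT B =====
-- `keys` is the set comprehension; `lengths` sorts the set of keyword lengths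
-- (sorted output does not depend on Python's set iteration order: the lengths are
-- distinct and compared by value); the nested loop probes lowered[j:j+L] in keys,
-- collecting found lowered keywords, and the final filter is the list comprehension.
def find_blacklist_hits_alt (text : String) (blacklist_keywords : List String) : List String :=
  let lowered := PySem.Chars.lower text.toList
  let keys : PySem.Set (List Char) :=
    PySem.Set.ofList ((blacklist_keywords.filter (fun kw => !decide (kw.toList = []))).map
      (fun kw => PySem.Chars.lower kw.toList))
  let lengths := PySem.List.sorted (PySem.Set.ofList (keys.map List.length)) (fun L => L) false
  let found := (List.range lowered.length).foldl
    (fun F (j : Nat) => lengths.foldl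
      (fun F (L : Nat) =>
        let sub := PySem.List.slice lowered (some (j : Int)) (some ((j : Int) + (L : Int)))
        if PySem.Set.contains keys sub then PySem.Set.add F sub else F)
      F)
    PySem.Set.empty
  blacklist_keywords.filter
    (fun kw => !decide (kw.toList = []) && PySem.Set.contains found (PySem.Chars.lower kw.toList))

-- ===== PRECONDITION & SPEC =====
def Spec_find_blacklist_hits (text : String) (blacklist_keywords : List String) (out : List String) : Prop := out = find_blacklist_hits_alt text blacklist_keywords
instance (text : String) (blacklist_keywords : List String) (out : List String) : Decidable (Spec_find_blacklist_hits text blacklist_keywords out) := by unfold Spec_find_blacklist_hits; infer_instance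

-- ===== CLAIM (what is proved, stated in full; the proofs are below) =====
def Claim_equal_find_blacklist_hits : Prop := ∀ (text : String) (blacklist_keywords : List String), Dom_find_blacklist_hits text blacklist_keywords → Spec_find_blacklist_hits text blacklist_keywords (find_blacklist_hits text blacklist_keywords)

-- ===== LEMMAS AND PROOFS =====

-- membership after the inner loop over the distinct keyword lengths at one position
lemma pv_probe (lowered : List Char) (keys : PySem.Set (List Char)) (lengths : List Nat)
    (j : Nat) (F : PySem.Set (List Char)) (x : List Char) :
    x ∈ lengths.foldl
      (fun F (L : Nat) =>
        let sub := PySem.List.slice lowered (some (j : Int)) (some ((j : Int) + (L : Int)))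
        if PySem.Set.contains keys sub then PySem.Set.add F sub else F)
      F
    ↔ x ∈ F ∨ ∃ L ∈ lengths,
        PySem.Set.contains keys ((lowered.drop j).take L) = true ∧ x = (lowered.drop j).take L := by
  have hfun : (fun (F : PySem.Set (List Char)) (L : Nat) =>
      let sub := PySem.List.slice lowered (some (j : Int)) (some ((j : Int) + (L : Int)))
      if PySem.Set.contains keys sub then PySem.Set.add F sub else F)
      = (fun (F : PySem.Set (List Char)) (L : Nat) =>
        if PySem.Set.contains keys ((lowered.drop j).take L) then PySem.Set.add F ((lowered.drop j).take L) else F) := by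
    funext F L
    have : PySem.List.slice lowered (some (j : Int)) (some ((j : Int) + (L : Int)))
        = (lowered.drop j).take L := by simp [pysem]
    simp only [this]
  rw [hfun]
  induction lengths generalizing F with
  | nil => simp
  | cons L rest ih =>
    rw [List.foldl_cons]
    by_cases h : PySem.Set.contains keys ((lowered.drop j).take L) = true
    · rw [if_pos h]
      refine (ih _).trans ?_
      rw [PySem.Set.mem_add]
      constructor
      · rintro ((hF | rfl) | ⟨L', hL', hc, rfl⟩)
        · exact Or.inl hF
        · exact Or.inr ⟨L, List.mem_cons_self, h, rfl⟩
        · exact Or.inr ⟨L', List.mem_cons_of_mem _ hL', hc, rfl⟩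
      · rintro (hF | ⟨L', hL', hc, rfl⟩)
        · exact Or.inl (Or.inl hF)
        · rcases List.mem_cons.mp hL' with rfl | hL'
          · exact Or.inl (Or.inr rfl)
          · exact Or.inr ⟨L', hL', hc, rfl⟩
    · rw [if_neg h]
      refine (ih _).trans ?_
      constructor
      · rintro (hF | ⟨L', hL', hc, rfl⟩)
        · exact Or.inl hF
        · exact Or.inr ⟨L', List.mem_cons_of_mem _ hL', hc, rfl⟩
      · rintro (hF | ⟨L', hL', hc, rfl⟩)
        · exact Or.inl hF
        · rcases List.mem_cons.mp hL' with rfl | hL'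
          · exact absurd hc h
          · exact Or.inr ⟨L', hL', hc, rfl⟩

-- membership after the whole position scan
lemma pv_scan (lowered : List Char) (keys : PySem.Set (List Char)) (lengths : List Nat)
    (n : Nat) (x : List Char) :
    x ∈ (List.range n).foldl
      (fun F (j : Nat) => lengths.foldl
        (fun F (L : Nat) =>
          let sub := PySem.List.slice lowered (some (j : Int)) (some ((j : Int) + (L : Int)))
          if PySem.Set.contains keys sub then PySem.Set.add F sub else F)
        F)
      PySem.Set.empty
    ↔ ∃ j < n, ∃ L ∈ lengths,
        PySem.Set.contains keys ((lowered.drop j).take L) = true ∧ x = (lowered.drop j).take L := by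
  induction n with
  | zero => simp [PySem.Set.empty]
  | succ n ih =>
    rw [List.range_succ, List.foldl_append, List.foldl_cons, List.foldl_nil, pv_probe, ih]
    constructor
    · rintro (⟨j, hj, hrest⟩ | ⟨L, hL, hc, rfl⟩)
      · exact ⟨j, Nat.lt_succ_of_lt hj, hrest⟩
      · exact ⟨n, Nat.lt_succ_self n, L, hL, hc, rfl⟩
    · rintro ⟨j, hj, hrest⟩
      rcases Nat.lt_succ_iff_lt_or_eq.mp hj with hj' | rfl
      · exact Or.inl ⟨j, hj', hrest⟩
      · exact Or.inr hrest

-- A's accumulator loop is a filter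
lemma pv_A_filter (lowered : List Char) (bl : List String) :
    bl.foldl
      (fun hits keyword =>
        if keyword.toList = [] then hits
        else if PySem.Chars.isIn (PySem.Chars.lower keyword.toList) lowered then hits ++ [keyword]
        else hits)
      []
    = bl.filter (fun kw => !decide (kw.toList = []) && PySem.Chars.isIn (PySem.Chars.lower kw.toList) lowered) := by
  have hf : (fun (hits : List String) (keyword : String) =>
        if keyword.toList = [] then hits
        else if PySem.Chars.isIn (PySem.Chars.lower keyword.toList) lowered then hits ++ [keyword]
        else hits)
      = (fun hits keyword =>
        if (!decide (keyword.toList = []) && PySem.Chars.isIn (PySem.Chars.lower keyword.toList) lowered) then hits ++ [keyword] else hits) := by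
    funext hits keyword
    by_cases h : keyword.toList = [] <;> by_cases h2 : PySem.Chars.isIn (PySem.Chars.lower keyword.toList) lowered <;> simp [h, h2]
  rw [hf, PySem.List.foldl_append_if_eq_filter]
  simp

-- for a nonempty keyword of the blacklist, membership in B's found set is exactly
-- A's substring test on the lowered text
lemma pv_found_iff (text : String) (bl : List String) (kw : String)
    (hkw : kw ∈ bl) (hne : kw.toList ≠ []) :
    PySem.Set.contains
      ((List.range (PySem.Chars.lower text.toList).length).foldl
        (fun F (j : Nat) => (PySem.List.sorted
            (PySem.Set.ofList ((PySem.Set.ofList ((bl.filter (fun k => !decide (k.toList = []))).map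
              (fun k => PySem.Chars.lower k.toList))).map List.length)) (fun L => L) false).foldl
          (fun F (L : Nat) =>
            let sub := PySem.List.slice (PySem.Chars.lower text.toList) (some (j : Int)) (some ((j : Int) + (L : Int)))
            if PySem.Set.contains (PySem.Set.ofList ((bl.filter (fun k => !decide (k.toList = []))).map
                (fun k => PySem.Chars.lower k.toList))) sub then PySem.Set.add F sub else F)
          F)
        PySem.Set.empty)
      (PySem.Chars.lower kw.toList)
    = PySem.Chars.isIn (PySem.Chars.lower kw.toList) (PySem.Chars.lower text.toList) := by
  set lowered := PySem.Chars.lower text.toList with hlow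
  set keys := PySem.Set.ofList ((bl.filter (fun k => !decide (k.toList = []))).map
      (fun k => PySem.Chars.lower k.toList)) with hkeys
  set lengths := PySem.List.sorted (PySem.Set.ofList (keys.map List.length)) (fun L => L) false with hlen
  set x := PySem.Chars.lower kw.toList with hx
  have hxkeys : x ∈ keys := by
    rw [hkeys, PySem.Set.mem_ofList]
    exact List.mem_map.mpr ⟨kw, List.mem_filter.mpr ⟨hkw, by simp [hne]⟩, rfl⟩
  have hxne : x ≠ [] := by
    rw [hx, PySem.Chars.lower]
    simpa using hne
  have hciff : ∀ (s : PySem.Set (List Char)) (y : List Char), PySem.Set.contains s y = true ↔ y ∈ s := by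
    intro s y; simp [PySem.Set.contains]
  rw [Bool.eq_iff_iff, hciff, pv_scan]
  constructor
  · rintro ⟨j, hj, L, hL, hc, hxeq⟩
    apply (PySem.Chars.exists_prefix_drop_iff_isIn x lowered).mp
    exact ⟨j, hxeq ▸ List.take_prefix L (lowered.drop j)⟩
  · intro hin
    obtain ⟨j, hpre⟩ := (PySem.Chars.exists_prefix_drop_iff_isIn x lowered).mpr hin
    have hjlt : j < lowered.length := by
      by_contra hge
      have : lowered.drop j = [] := List.drop_eq_nil_of_le (by omega)
      rw [this] at hpre
      exact hxne (List.prefix_nil.mp hpre)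
    have hLmem : x.length ∈ lengths := by
      rw [hlen, PySem.List.mem_sorted, PySem.Set.mem_ofList]
      exact List.mem_map.mpr ⟨x, hxkeys, rfl⟩
    have htake : (lowered.drop j).take x.length = x := (List.prefix_iff_eq_take.mp hpre).symm
    refine ⟨j, hjlt, x.length, hLmem, ?_, htake.symm⟩
    rw [htake]
    simpa [PySem.Set.contains, List.contains_iff_mem] using hxkeys

-- ===== VERDICT (by name: the statement is the Claim_ definition above) =====
theorem find_blacklist_hits_spec : Claim_equal_find_blacklist_hits := by
  intro text bl _dom
  unfold Spec_find_blacklist_hits find_blacklist_hits find_blacklist_hits_alt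
  by_cases htext : text.toList = []
  · -- empty text: A returns []; B's scan runs over 0 positions, found stays empty
    have hlow : PySem.Chars.lower text.toList = [] := by simp [PySem.Chars.lower, htext]
    rw [if_pos (Or.inl htext)]
    simp only [hlow, List.length_nil, List.range_zero, List.foldl_nil]
    rw [eq_comm, List.filter_eq_nil_iff]
    intro kw _
    simp [PySem.Set.empty, PySem.Set.contains]
  · by_cases hbl : bl = []
    · subst hbl; simp
    · rw [if_neg (by tauto)]
      simp only []
      rw [pv_A_filter]
      apply List.filter_congr
      intro kw hkw
      by_cases hne : kw.toList = []
      · simp [hne]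
      · rw [pv_found_iff text bl kw hkw hne]
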